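-- pv_equiv track=rewrite | github.com/dssheth/codon-highlighter | translate.py | format_translation_frame
-- ===== SOURCE A (Python) =====
-- def format_translation_frame(frame_name, aas):
--     html = f"<h3>{frame_name}</h3>\n<div style='font-family:monospace; padding-left: 5rem;'>"
--
--     start = 0
--     stop = 0
--     aas_line = ""
--     aas_per_line = 60
--     for i, aa in enumerate(aas):
--         if aa == '*' and start == 1:
--             stop = 1
--             start = 0
--             aa_fmt = "<span style='color:red; font-weight:bold;'>stop</span> "
--         elif aa == 'M' and start == 0:
--             start = 1
--             stop = 0
--             aa_fmt = "<span style='color:green; font-weight:bold;'>M</span> "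
--         elif start == 1 and stop == 0:
--             aa_fmt = f"{aa} "
--         else:
--             aa_fmt = f"<span style='color:lightblue; font-weight:bold;'>{aa}</span> "
--
--         aas_line += aa_fmt
--
--         if (i + 1) % aas_per_line == 0:
--             html += f"<pre>{aas_line.strip()}</pre>\n"
--             aas_line = ""
--
--     if aas_line:
--         html += f"<pre>{aas_line.strip()}</pre>\n"
--
--     html += "</div><hr>"
--     return html
-- ===== SOURCE B (Python) =====
-- def _classify(aa, start):
--     # start/stop machine: stop==0 whenever start==1, so only `start` is needed
--     if aa == '*' and start == 1:
--         return 0, "<span style='color:red; font-weight:bold;'>stop</span> "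
--     if aa == 'M' and start == 0:
--         return 1, "<span style='color:green; font-weight:bold;'>M</span> "
--     if start == 1:
--         return start, aa + " "
--     return start, "<span style='color:lightblue; font-weight:bold;'>" + aa + "</span> "
--
--
-- def format_translation_frame(frame_name, aas):
--     # Pass 1: classify each amino acid into an HTML token.
--     tokens = []
--     start = 0
--     for aa in aas:
--         start, tok = _classify(aa, start)
--         tokens.append(tok)
--     # Pass 2: chunk the token list into lines of 60.
--     body = ""
--     rest = tokens
--     while rest:
--         chunk, rest = rest[:60], rest[60:]
--         body += "<pre>" + "".join(chunk).strip() + "</pre>\n"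
--     return ("<h3>" + frame_name + "</h3>\n<div style='font-family:monospace; padding-left: 5rem;'>"
--             + body + "</div><hr>")
-- ===== Notes on version B (the rewrite author's own statement) =====
-- stated objective: alternative
-- what changed: B splits A's single accumulating loop into two passes: a classify pass that drops the redundant stop flag (stop is 0 whenever start is 1) and builds a token list, then a chunking loop that slices 60 tokens per <pre> line, replacing A's inline modulo-counter flush and trailing-remainder branch.
import Mathlib
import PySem

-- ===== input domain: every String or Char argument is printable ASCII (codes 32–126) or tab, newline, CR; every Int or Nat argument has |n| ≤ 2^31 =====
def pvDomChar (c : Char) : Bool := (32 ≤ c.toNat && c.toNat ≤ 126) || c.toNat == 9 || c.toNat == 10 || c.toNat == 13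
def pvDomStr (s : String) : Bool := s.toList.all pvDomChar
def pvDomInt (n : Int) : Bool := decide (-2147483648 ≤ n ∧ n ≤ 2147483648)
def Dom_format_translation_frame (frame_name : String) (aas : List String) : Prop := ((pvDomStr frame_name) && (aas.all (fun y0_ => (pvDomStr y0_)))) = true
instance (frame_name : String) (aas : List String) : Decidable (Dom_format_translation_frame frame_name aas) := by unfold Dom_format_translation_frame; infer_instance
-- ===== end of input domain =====

-- B separates token classification from line chunking (one classify pass into a token
-- list, then a 60-token slicing loop), dropping A's redundant `stop` flag and inline
-- modulo flush; same return value, objective: alternative decomposition.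

-- ===== PORT A =====
-- A's if/elif chain assigning (start, stop, aa_fmt), as a helper.
def pvAStep (aa : String) (start stop : Int) : Int × Int × String :=
  if aa = "*" ∧ start = 1 then
    ((0 : Int), (1 : Int), "<span style='color:red; font-weight:bold;'>stop</span> ")
  else if aa = "M" ∧ start = 0 then
    ((1 : Int), (0 : Int), "<span style='color:green; font-weight:bold;'>M</span> ")
  else if start = 1 ∧ stop = 0 then (start, stop, aa ++ " ")
  else (start, stop, "<span style='color:lightblue; font-weight:bold;'>" ++ aa ++ "</span> ")

-- A's for-loop as the obvious recursion over the remaining list, carrying Python's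
-- i, start, stop, aas_line and html; the [] case is the code after the loop.
def pvALoop (aas : List String) (i : Nat) (start stop : Int) (line html : String) : String :=
  match aas with
  | [] =>
      (if line ≠ "" then html ++ ("<pre>" ++ PySem.Str.strip line ++ "</pre>\n") else html)
        ++ "</div><hr>"
  | aa :: rest =>
      if (i + 1) % 60 = 0 then
        pvALoop rest (i + 1) (pvAStep aa start stop).1 (pvAStep aa start stop).2.1 ""
          (html ++ ("<pre>" ++ PySem.Str.strip (line ++ (pvAStep aa start stop).2.2) ++ "</pre>\n"))
      else
        pvALoop rest (i + 1) (pvAStep aa start stop).1 (pvAStep aa start stop).2.1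
          (line ++ (pvAStep aa start stop).2.2) html

def format_translation_frame (frame_name : String) (aas : List String) : String :=
  pvALoop aas 0 0 0 ""
    ("<h3>" ++ frame_name ++ "</h3>\n<div style='font-family:monospace; padding-left: 5rem;'>")

-- ===== PORT B =====
-- B's _classify helper: the new (start, token) for one amino acid.
def pvBStep (aa : String) (start : Int) : Int × String :=
  if aa = "*" ∧ start = 1 then
    ((0 : Int), "<span style='color:red; font-weight:bold;'>stop</span> ")
  else if aa = "M" ∧ start = 0 then
    ((1 : Int), "<span style='color:green; font-weight:bold;'>M</span> ")
  else if start = 1 then (start, aa ++ " ")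
  else (start, "<span style='color:lightblue; font-weight:bold;'>" ++ aa ++ "</span> ")

-- B pass 1: classify each amino acid into its HTML token; only `start` is carried.
def pvBTokens (aas : List String) (start : Int) (acc : List String) : List String :=
  match aas with
  | [] => acc
  | aa :: rest => pvBTokens rest (pvBStep aa start).1 (acc ++ [(pvBStep aa start).2])

-- B pass 2: the while loop peeling 60 tokens per line; rest[:60] / rest[60:] on the
-- nonempty list t :: tl are List.take 60 / List.drop 60, i.e. t :: take 59 tl / drop 59 tl
-- (exact: the bounds are nonnegative literals).
def pvBLines (ts : List String) : String :=
  match ts with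
  | [] => ""
  | t :: tl =>
      ("<pre>" ++ PySem.Str.strip (PySem.Str.join "" (t :: List.take 59 tl)) ++ "</pre>\n")
        ++ pvBLines (List.drop 59 tl)
termination_by ts.length
decreasing_by simp

def format_translation_frame_alt (frame_name : String) (aas : List String) : String :=
  "<h3>" ++ frame_name ++ "</h3>\n<div style='font-family:monospace; padding-left: 5rem;'>"
    ++ pvBLines (pvBTokens aas 0 []) ++ "</div><hr>"

-- ===== PRECONDITION & SPEC =====
def Spec_format_translation_frame (frame_name : String) (aas : List String) (out : String) : Prop := out = format_translation_frame_alt frame_name aas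
instance (frame_name : String) (aas : List String) (out : String) : Decidable (Spec_format_translation_frame frame_name aas out) := by unfold Spec_format_translation_frame; infer_instance

-- ===== CLAIM (what is proved, stated in full; the proofs are below) =====
def Claim_equal_format_translation_frame : Prop := ∀ (frame_name : String) (aas : List String), Dom_format_translation_frame frame_name aas → Spec_format_translation_frame frame_name aas (format_translation_frame frame_name aas)

-- ===== LEMMAS AND PROOFS =====

-- A's line building and modulo flush, replayed over a ready token list:
-- `line` is the partially built current line holding k = i % 60 tokens.
def pvChunk (line : String) (k : Nat) (ts : List String) : String :=
  match ts with
  | [] => if line ≠ "" then "<pre>" ++ PySem.Str.strip line ++ "</pre>\n" else ""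
  | tok :: rest =>
      if k = 59 then
        ("<pre>" ++ PySem.Str.strip (line ++ tok) ++ "</pre>\n") ++ pvChunk "" 0 rest
      else pvChunk (line ++ tok) (k + 1) rest

lemma join0_cons (a : String) (ts : List String) :
    PySem.Str.join "" (a :: ts) = a ++ PySem.Str.join "" ts := by
  cases ts with
  | nil =>
      apply String.toList_inj.mp
      simp [PySem.Str.toList_join, PySem.Chars.join_singleton, String.toList_append,
        PySem.Chars.join_nil]
  | cons b tl =>
      apply String.toList_inj.mp
      simp [PySem.Str.toList_join, String.toList_append, PySem.Chars.join_cons_cons]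

lemma join0_nil : PySem.Str.join "" ([] : List String) = "" := by
  apply String.toList_inj.mp
  simp [PySem.Str.toList_join, PySem.Chars.join_nil]

lemma append_ne_empty_right (s t : String) (h : t ≠ "") : s ++ t ≠ "" := by
  simp [String.append_eq_empty_iff]; tauto

lemma bStep_ne_empty (aa : String) (s : Int) : (pvBStep aa s).2 ≠ "" := by
  unfold pvBStep
  split_ifs
  · decide
  · decide
  · exact append_ne_empty_right _ _ (by decide)
  · exact append_ne_empty_right _ _ (by decide)

-- A's branch chain agrees with B's given the invariant (start = 1 → stop = 0),
-- and the invariant is preserved.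
lemma step_rel (aa : String) (s t : Int) (hst : s = 1 → t = 0) :
    (pvAStep aa s t).1 = (pvBStep aa s).1 ∧ (pvAStep aa s t).2.2 = (pvBStep aa s).2 ∧
      ((pvAStep aa s t).1 = 1 → (pvAStep aa s t).2.1 = 0) := by
  unfold pvAStep pvBStep
  by_cases h1 : aa = "*" ∧ s = 1
  · simp [h1]
  · by_cases h2 : aa = "M" ∧ s = 0
    · simp [h2]
    · by_cases h3 : s = 1
      · have haa : aa ≠ "*" := fun h => h1 ⟨h, h3⟩
        simp [h3, hst h3, haa]
      · simp [h2, h3]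

lemma bTokens_acc : ∀ (aas : List String) (s : Int) (acc : List String),
    pvBTokens aas s acc = acc ++ pvBTokens aas s [] := by
  intro aas
  induction aas with
  | nil => simp [pvBTokens]
  | cons aa rest ih =>
      intro s acc
      simp only [pvBTokens]
      rw [ih _ (acc ++ _), ih _ ([] ++ _)]
      simp

lemma bTokens_ne_empty : ∀ (aas : List String) (s : Int) (t : String),
    t ∈ pvBTokens aas s [] → t ≠ "" := by
  intro aas
  induction aas with
  | nil => simp [pvBTokens]
  | cons aa rest ih =>
      intro s t ht
      simp only [pvBTokens, List.nil_append] at ht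
      rw [bTokens_acc] at ht
      rcases List.mem_append.mp ht with h | h
      · rw [List.mem_singleton] at h
        subst h
        exact bStep_ne_empty aa s
      · exact ih _ _ h

lemma loop_eq : ∀ (aas : List String) (i : Nat) (s t : Int) (line html : String),
    (s = 1 → t = 0) →
    pvALoop aas i s t line html
      = html ++ pvChunk line (i % 60) (pvBTokens aas s []) ++ "</div><hr>" := by
  intro aas
  induction aas with
  | nil =>
      intro i s t line html _
      simp only [pvALoop, pvBTokens, pvChunk]
      split_ifs <;> simp [String.append_assoc]
  | cons aa rest ih =>
      intro i s t line html hst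
      have hmod : (i + 1) % 60 = 0 ↔ i % 60 = 59 := by omega
      have hmod2 : ¬ i % 60 = 59 → (i + 1) % 60 = i % 60 + 1 := by omega
      obtain ⟨e1, e2, hinv⟩ := step_rel aa s t hst
      simp only [pvALoop, pvBTokens, List.nil_append]
      rw [bTokens_acc, List.singleton_append]
      simp only [pvChunk]
      by_cases hfl : (i + 1) % 60 = 0
      · rw [if_pos hfl, if_pos (hmod.mp hfl), ih _ _ _ _ _ hinv, hfl, e1, e2]
        simp [String.append_assoc]
      · rw [if_neg hfl, if_neg (fun h => hfl (hmod.mpr h)), ih _ _ _ _ _ hinv,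
          hmod2 (fun h => hfl (hmod.mpr h)), e1, e2]

-- pvBLines unfolded once on a nonempty list, via take 60 / drop 60.
lemma bLines_cons (r : String) (tl : List String) :
    pvBLines (r :: tl)
      = ("<pre>" ++ PySem.Str.strip (PySem.Str.join "" (List.take 60 (r :: tl))) ++ "</pre>\n")
          ++ pvBLines (List.drop 60 (r :: tl)) := by
  rw [pvBLines]
  simp [List.take_succ_cons, List.drop_succ_cons]

lemma chunk_formula : ∀ (n : Nat) (ts : List String), ts.length ≤ n →
    (∀ t ∈ ts, t ≠ "") → ∀ (line : String) (k : Nat), k ≤ 59 →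
    pvChunk line k ts =
      if ts = [] then (if line ≠ "" then "<pre>" ++ PySem.Str.strip line ++ "</pre>\n" else "")
      else ("<pre>" ++ PySem.Str.strip (line ++ PySem.Str.join "" (List.take (60 - k) ts)) ++ "</pre>\n")
             ++ pvBLines (List.drop (60 - k) ts) := by
  intro n
  induction n with
  | zero =>
      intro ts hlen _ line k _
      have : ts = [] := List.eq_nil_of_length_eq_zero (Nat.le_zero.mp hlen)
      subst this
      simp [pvChunk]
  | succ n ih =>
      intro ts hlen hne line k hk
      cases ts with
      | nil => simp [pvChunk]
      | cons tok rest =>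
          have hrest : rest.length ≤ n := by simpa using hlen
          have hne' : ∀ t ∈ rest, t ≠ "" := fun t ht => hne t (List.mem_cons_of_mem _ ht)
          have htok : tok ≠ "" := hne tok (List.mem_cons_self)
          have htk : (60 - k) = (59 - k) + 1 := by omega
          rw [htk]
          simp only [pvChunk, List.take_succ_cons, List.drop_succ_cons, join0_cons]
          by_cases h59 : k = 59
      -- flush: the 60th token closes the line; the tail restarts at k = 0
          · subst h59
            rw [if_pos rfl]
            have tail : pvChunk "" 0 rest = pvBLines rest := by
              cases rest with
              | nil => simp [pvChunk, pvBLines]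
              | cons r tl =>
                  rw [ih _ (by simpa using hrest) (by
                    intro t ht; exact hne' t ht) "" 0 (by omega), if_neg (by simp),
                    bLines_cons]
                  simp [String.empty_append]
            rw [tail]
            have h0 : (59 : Nat) - 59 = 0 := rfl
            simp only [h0, List.take_zero, List.drop_zero]
            rw [if_neg (by simp), join0_nil, String.append_empty]
          · rw [if_neg h59, ih _ hrest hne' (line ++ tok) (k + 1) (by omega)]
            by_cases hrnil : rest = []
            · subst hrnil
              have h1 : line ++ tok ≠ "" := append_ne_empty_right _ _ htok
              rw [if_pos rfl, if_pos h1, if_neg (by simp)]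
              simp [join0_nil, String.append_empty, pvBLines]
            · rw [if_neg hrnil, if_neg (by simp)]
              have h60 : 60 - (k + 1) = 59 - k := by omega
              rw [h60]
              simp [String.append_assoc]

-- ===== VERDICT (by name: the statement is the Claim_ definition above) =====
theorem format_translation_frame_spec : Claim_equal_format_translation_frame := by
  intro fn aas _
  unfold Spec_format_translation_frame format_translation_frame format_translation_frame_alt
  rw [loop_eq aas 0 0 0 "" _ (by intro h; cases h)]
  have hne := bTokens_ne_empty aas 0
  have h := chunk_formula (pvBTokens aas 0 []).length (pvBTokens aas 0 []) le_rfl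
    (fun t ht => hne t ht) "" 0 (by omega)
  rw [Nat.zero_mod, h]
  by_cases hnil : pvBTokens aas 0 [] = []
  · rw [if_pos hnil, hnil]
    simp [pvBLines]
  · rw [if_neg hnil]
    cases hcs : pvBTokens aas 0 [] with
    | nil => exact absurd hcs hnil
    | cons r tl =>
        rw [bLines_cons]
        simp [String.empty_append]
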